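-- pv_equiv track=rewrite | github.com/patrickfrey/strusWikipediaSearch | scripts/strusnlp_spacy.py | isInStringListPart
-- ===== SOURCE A (Python) =====
-- def cmpStringListPart( dest, dstart, dend, add, astart, aend):
--     ee = aend - astart
--     ei = 0
--     if ee != dend - dstart:
--         return False
--     while ei < ee and dest[ dstart + ei] == add[ astart + ei]:
--         ei += 1
--     return ei == ee
--
-- def isInStringListPart( dest, add, astart, aend):
--     di = 0
--     de = len(dest)
--     while di < de:
--         dn = di
--         while dn < de and dest[ dn] != ',':
--             dn += 1
--         if cmpStringListPart( dest, di, dn, add, astart, aend):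
--             return True
--         di = dn + 1
--     return False
-- ===== SOURCE B (Python) =====
-- def isInStringListPart(dest, add, astart, aend):
--     if not dest or aend < astart:
--         return False
--     target = add[astart:aend]
--     if ',' in target:
--         return False
--     return (',' + target + ',') in (',' + dest + ',')
-- ===== Notes on version B (the rewrite author's own statement) =====
-- stated objective: alternative
-- what changed: Replaces A's nested per-field scanning (manual comma walk plus a char-by-char comparison helper) by extracting the target slice once and testing delimiter-wrapped substring containment: (','+target+',') in (','+dest+',').
-- intended difference: When the target range is empty (astart == aend) and dest ends with a comma while containing no other empty field, A returns False because its scan stops before the trailing empty field, while B returns True, the intended value since '' is one of dest's comma-separated fields. — e.g. on isInStringListPart("a,", "x", 0, 0): A returns false, B returns true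
-- outside the precondition, e.g. on isInStringListPart('ab', 'ab', 0, 5): A returns False, B returns True; on isInStringListPart('ab', 'ab', -2, 0): A returns True, B returns False
import Mathlib
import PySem

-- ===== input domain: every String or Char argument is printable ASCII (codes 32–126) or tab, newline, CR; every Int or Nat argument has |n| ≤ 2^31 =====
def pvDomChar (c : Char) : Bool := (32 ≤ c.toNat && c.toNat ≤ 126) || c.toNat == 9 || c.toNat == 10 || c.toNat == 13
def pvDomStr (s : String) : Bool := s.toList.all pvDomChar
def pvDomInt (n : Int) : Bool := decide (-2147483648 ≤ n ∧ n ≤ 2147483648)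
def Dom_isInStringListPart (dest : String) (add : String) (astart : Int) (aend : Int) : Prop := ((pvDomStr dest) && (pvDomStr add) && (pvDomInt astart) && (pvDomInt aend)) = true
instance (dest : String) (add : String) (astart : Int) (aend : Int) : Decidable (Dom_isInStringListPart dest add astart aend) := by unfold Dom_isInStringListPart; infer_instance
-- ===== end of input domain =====

-- B replaces A's nested per-field scanning by delimiter-wrapped substring search on the
-- extracted slice (return-value equivalence; neither version mutates its arguments).

-- ===== PORT A =====
-- while ei < ee and dest[dstart+ei] == add[astart+ei]: ei += 1   (fuel = ee.toNat bounds the loop)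
def pvCmpLoop (dest add : List Char) (dstart astart ee ei : Int) : Nat → Int
  | 0 => ei
  | fuel+1 =>
    if ei < ee && (PySem.List.pyGet? dest (dstart + ei) == PySem.List.pyGet? add (astart + ei))
    then pvCmpLoop dest add dstart astart ee (ei + 1) fuel
    else ei

def pvCmp (dest : List Char) (dstart dend : Int) (add : List Char) (astart aend : Int) : Bool :=
  let ee := aend - astart
  if ee ≠ dend - dstart then false
  else pvCmpLoop dest add dstart astart ee 0 ee.toNat == ee

-- while dn < de and dest[dn] != ',': dn += 1
def pvScanComma (dest : List Char) (de dn : Int) : Nat → Int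
  | 0 => dn
  | fuel+1 =>
    if dn < de && (PySem.List.pyGet? dest dn != some ',')
    then pvScanComma dest de (dn + 1) fuel
    else dn

-- the outer while di < de loop; di grows by at least 1 per round, fuel = de.toNat + 1 suffices
def pvOuter (dest add : List Char) (astart aend de di : Int) : Nat → Bool
  | 0 => false
  | fuel+1 =>
    if di < de then
      let dn := pvScanComma dest de di (de - di).toNat
      if pvCmp dest di dn add astart aend then true
      else pvOuter dest add astart aend de (dn + 1) fuel
    else false

def isInStringListPart (dest : String) (add : String) (astart : Int) (aend : Int) : Bool :=
  pvOuter dest.toList add.toList astart aend (dest.toList.length : Int) 0 (dest.toList.length + 1)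

-- ===== PORT B =====
def isInStringListPart_alt (dest : String) (add : String) (astart : Int) (aend : Int) : Bool :=
  if dest = "" || aend < astart then false
  else if PySem.Chars.isIn [','] (PySem.List.slice add.toList (some astart) (some aend)) then
    false
  else
    PySem.Chars.isIn ([','] ++ PySem.List.slice add.toList (some astart) (some aend) ++ [','])
      ([','] ++ dest.toList ++ [','])

-- ===== PRECONDITION & SPEC =====
-- Pre_ excludes nonempty target ranges with negative start (A indexes add from the end, B's
-- slice does not) or reaching past len(add) (there A raises IndexError whenever some field
-- length matches the range, and otherwise returns False while B compares the clamped slice).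
def Pre_isInStringListPart (dest : String) (add : String) (astart : Int) (aend : Int) : Prop :=
  aend ≤ astart ∨ (0 ≤ astart ∧ aend ≤ (add.toList.length : Int))
instance (dest : String) (add : String) (astart : Int) (aend : Int) : Decidable (Pre_isInStringListPart dest add astart aend) := by unfold Pre_isInStringListPart; infer_instance

def pvWitness_isInStringListPart : String × String × Int × Int := ("a,b", "b", 0, 1)

-- When the target slice is empty and dest ends with a comma while containing no other empty
-- field, A returns False (its scan stops before the trailing empty field) while B returns True,
-- the intended value since '' is one of dest's comma-separated fields (dest.split(',')).
def D_isInStringListPart (dest : String) (add : String) (astart : Int) (aend : Int) : Prop :=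
  astart = aend ∧ dest.toList ≠ [] ∧ dest.toList.getLast? = some ',' ∧
  dest.toList.head? ≠ some ',' ∧ PySem.Chars.isIn [',', ','] dest.toList = false
instance (dest : String) (add : String) (astart : Int) (aend : Int) : Decidable (D_isInStringListPart dest add astart aend) := by unfold D_isInStringListPart; infer_instance

def Spec_isInStringListPart (dest : String) (add : String) (astart : Int) (aend : Int) (out : Bool) : Prop := ¬ D_isInStringListPart dest add astart aend → out = isInStringListPart_alt dest add astart aend
instance (dest : String) (add : String) (astart : Int) (aend : Int) (out : Bool) : Decidable (Spec_isInStringListPart dest add astart aend out) := by unfold Spec_isInStringListPart; infer_instance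

def pvDiffWitness_isInStringListPart : String × String × Int × Int := ("a,", "x", 0, 0)
def pvDiffWitnessOut_isInStringListPart : Bool × Bool := (false, true)

-- ===== CLAIM (what is proved, stated in full; the proofs are below) =====
def Claim_unchanged_isInStringListPart : Prop := ∀ (dest : String) (add : String) (astart : Int) (aend : Int), Dom_isInStringListPart dest add astart aend → Pre_isInStringListPart dest add astart aend → Spec_isInStringListPart dest add astart aend (isInStringListPart dest add astart aend)
def Claim_changed_isInStringListPart : Prop := Dom_isInStringListPart (pvDiffWitness_isInStringListPart.1) (pvDiffWitness_isInStringListPart.2.1) (pvDiffWitness_isInStringListPart.2.2.1) (pvDiffWitness_isInStringListPart.2.2.2) ∧ Pre_isInStringListPart (pvDiffWitness_isInStringListPart.1) (pvDiffWitness_isInStringListPart.2.1) (pvDiffWitness_isInStringListPart.2.2.1) (pvDiffWitness_isInStringListPart.2.2.2) ∧ D_isInStringListPart (pvDiffWitness_isInStringListPart.1) (pvDiffWitness_isInStringListPart.2.1) (pvDiffWitness_isInStringListPart.2.2.1) (pvDiffWitness_isInStringListPart.2.2.2) ∧ isInStringListPart (pvDiffWitness_isInStringListPart.1) (pvDiffWitness_isInStringListPart.2.1)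 (pvDiffWitness_isInStringListPart.2.2.1) (pvDiffWitness_isInStringListPart.2.2.2) = pvDiffWitnessOut_isInStringListPart.1 ∧ isInStringListPart_alt (pvDiffWitness_isInStringListPart.1) (pvDiffWitness_isInStringListPart.2.1) (pvDiffWitness_isInStringListPart.2.2.1) (pvDiffWitness_isInStringListPart.2.2.2) = pvDiffWitnessOut_isInStringListPart.2 ∧ pvDiffWitnessOut_isInStringListPart.1 ≠ pvDiffWitnessOut_isInStringListPart.2
def Claim_exact_isInStringListPart : Prop := ∀ (dest : String) (add : String) (astart : Int) (aend : Int), Dom_isInStringListPart dest add astart aend → Pre_isInStringListPart dest add astart aend → D_isInStringListPart dest add astart aend → isInStringListPart dest add astart aend ≠ isInStringListPart_alt dest add astart aend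

-- ===== LEMMAS AND PROOFS =====

-- the fields A's outer loop actually scans (a trailing empty field after a final comma is skipped)
def pvFieldsA (l : List Char) : List (List Char) :=
  if h : l = [] then []
  else l.takeWhile (· ≠ ',') :: pvFieldsA ((l.dropWhile (· ≠ ',')).tail)
termination_by l.length
decreasing_by
  cases l with
  | nil => exact absurd rfl h
  | cons c r =>
    have h1 := List.length_dropWhile_le (fun x => decide (x ≠ ',')) (c :: r)
    have h2 : ((c :: r).dropWhile (· ≠ ',')).tail.length
        = ((c :: r).dropWhile (· ≠ ',')).length - 1 := List.length_tail
    simp only [List.length_cons] at *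
    omega

-- structural mirror of Python's str.split(',')
def pvSplitC : List Char → List (List Char)
  | [] => [[]]
  | c :: rest =>
    if c = ',' then [] :: pvSplitC rest
    else match pvSplitC rest with
      | t :: ts => (c :: t) :: ts
      | [] => [[c]]

lemma pvSplitC_nil : pvSplitC [] = [[]] := rfl

lemma pvSplitC_comma (rest : List Char) : pvSplitC (',' :: rest) = [] :: pvSplitC rest := by
  simp [pvSplitC]

lemma pvSplitC_cons_ne (c : Char) (hc : c ≠ ',') (rest : List Char) (hd : List Char)
    (tl : List (List Char)) (h : pvSplitC rest = hd :: tl) :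
    pvSplitC (c :: rest) = (c :: hd) :: tl := by
  simp only [pvSplitC, if_neg hc, h]

lemma pvFieldsA_nil : pvFieldsA [] = [] := by rw [pvFieldsA]; simp

lemma pvFieldsA_unfold (l : List Char) (h : l ≠ []) :
    pvFieldsA l = l.takeWhile (· ≠ ',') :: pvFieldsA ((l.dropWhile (· ≠ ',')).tail) := by
  rw [pvFieldsA]; simp [h]

lemma pvFieldsA_ne_nil (l : List Char) (h : l ≠ []) : pvFieldsA l ≠ [] := by
  rw [pvFieldsA_unfold l h]; simp

lemma pvFieldsA_comma_cons (rest : List Char) :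
    pvFieldsA (',' :: rest) = [] :: pvFieldsA rest := by
  rw [pvFieldsA_unfold _ (by simp)]
  simp [List.takeWhile_cons, List.dropWhile_cons]

lemma pvFieldsA_cons_ne (c : Char) (hc : c ≠ ',') (rest : List Char) (h2 : rest ≠ [])
    (hd : List Char) (tl : List (List Char)) (hrest : pvFieldsA rest = hd :: tl) :
    pvFieldsA (c :: rest) = (c :: hd) :: tl := by
  rw [pvFieldsA_unfold rest h2] at hrest
  injection hrest with e1 e2
  rw [pvFieldsA_unfold _ (by simp)]
  have ht : (c :: rest).takeWhile (· ≠ ',') = c :: rest.takeWhile (· ≠ ',') := by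
    simp [List.takeWhile_cons, hc]
  have hdw : (c :: rest).dropWhile (· ≠ ',') = rest.dropWhile (· ≠ ',') := by
    simp [List.dropWhile_cons, hc]
  rw [ht, hdw, e1, e2]

lemma pvFieldsA_singleton (c : Char) (hc : c ≠ ',') : pvFieldsA [c] = [[c]] := by
  rw [pvFieldsA_unfold _ (by simp)]
  simp [List.takeWhile_cons, List.dropWhile_cons, hc, pvFieldsA_nil]

-- split(',') = the scanned fields, plus the trailing empty field A skips when dest ends with ','
lemma pvSplitC_fieldsA (l : List Char) :
    pvSplitC l = if l.getLast? = some ',' ∨ l = [] then pvFieldsA l ++ [[]] else pvFieldsA l := by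
  induction l with
  | nil => simp [pvSplitC_nil, pvFieldsA_nil]
  | cons c rest ih =>
    by_cases hc : c = ','
    · subst hc
      cases rest with
      | nil => simp [pvSplitC_nil, pvSplitC_comma, pvFieldsA_comma_cons, pvFieldsA_nil]
      | cons c2 r2 =>
        have hlast : (',' :: c2 :: r2).getLast? = (c2 :: r2).getLast? := List.getLast?_cons_cons
        rw [pvSplitC_comma, ih, pvFieldsA_comma_cons, hlast]
        by_cases hP : (c2 :: r2).getLast? = some ','
        · simp [hP]
        · simp [hP]
    · cases rest with
      | nil =>
        have hsp : pvSplitC [c] = [[c]] := pvSplitC_cons_ne c hc [] [] [] pvSplitC_nil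
        have hlast : (c :: ([] : List Char)).getLast? = some c := rfl
        rw [hsp, hlast]
        simp [hc, pvFieldsA_singleton c hc]
      | cons c2 r2 =>
        obtain ⟨hd, tl, hfa⟩ := List.exists_cons_of_ne_nil (pvFieldsA_ne_nil (c2 :: r2) (by simp))
        have hlast : (c :: c2 :: r2).getLast? = (c2 :: r2).getLast? := List.getLast?_cons_cons
        have hcons := pvFieldsA_cons_ne c hc (c2 :: r2) (by simp) hd tl hfa
        by_cases hP : (c2 :: r2).getLast? = some ','
        · have hsp : pvSplitC (c2 :: r2) = hd :: (tl ++ [[]]) := by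
            rw [ih]; simp [hP, hfa]
          rw [pvSplitC_cons_ne c hc _ _ _ hsp, hlast, hcons]
          simp [hP]
        · have hsp : pvSplitC (c2 :: r2) = hd :: tl := by rw [ih]; simp [hP, hfa]
          rw [pvSplitC_cons_ne c hc _ _ _ hsp, hlast, hcons]
          simp [hP]

-- [x] is a prefix iff it is the head
lemma pvSingleton_prefix_iff (x : Char) (l : List Char) :
    [x] <+: l ↔ l.head? = some x := by
  cases l with
  | nil => simp
  | cons c r => simp [List.cons_prefix_cons, eq_comm]

-- where A's scan produces an empty field: a comma at the start, or two adjacent commas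
lemma pvMem_nil_fieldsA (l : List Char) :
    (([] ∈ pvFieldsA l) ↔ (l.head? = some ',' ∨ [',', ','] <:+: l)) ∧
    (([] ∈ (pvFieldsA l).tail) ↔ [',', ','] <:+: l) := by
  induction l with
  | nil => simp [pvFieldsA_nil, List.infix_nil]
  | cons c rest ih =>
    by_cases hc : c = ','
    · subst hc
      rw [pvFieldsA_comma_cons]
      have hinf : [',', ','] <:+: (',' :: rest) ↔ rest.head? = some ',' ∨ [',', ','] <:+: rest := by
        rw [List.infix_cons_iff, List.cons_prefix_cons]
        simp [pvSingleton_prefix_iff]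
      constructor
      · simp
      · simpa [hinf] using ih.1
    · have hinf : [',', ','] <:+: (c :: rest) ↔ [',', ','] <:+: rest := by
        rw [List.infix_cons_iff, List.cons_prefix_cons]
        simp [eq_comm, hc]
      cases rest with
      | nil =>
        rw [pvFieldsA_singleton c hc]
        simp [hc, List.infix_nil, hinf]
      | cons c2 r2 =>
        obtain ⟨hd, tl, hfa⟩ := List.exists_cons_of_ne_nil (pvFieldsA_ne_nil (c2 :: r2) (by simp))
        rw [pvFieldsA_cons_ne c hc (c2 :: r2) (by simp) hd tl hfa]
        have h2 := ih.2
        rw [hfa] at h2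
        simp only [List.tail_cons] at h2 ⊢
        constructor
        · simp [hc, hinf, h2]
        · simp [hinf, h2]

-- the per-field test equivalent to cmpStringListPart on a field of dest
def pvP (a : List Char) (astart ee : Int) (f : List Char) : Bool :=
  ((f.length : Int) == ee) &&
  (PySem.List.pyRange 0 ee 1).all
    (fun i => PySem.List.pyGet? a (astart + i) == PySem.List.pyGet? f i)

lemma pvP_iff (a : List Char) (astart ee : Int) (f : List Char) :
    pvP a astart ee f = true ↔
      ((f.length : Int) = ee ∧
        ∀ x : Int, 0 ≤ x → x < ee →
          PySem.List.pyGet? a (astart + x) = PySem.List.pyGet? f x) := by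
  unfold pvP
  rw [Bool.and_eq_true, beq_iff_eq, List.all_eq_true]
  constructor
  · rintro ⟨h1, h2⟩
    refine ⟨h1, fun x hx0 hxe => ?_⟩
    have := h2 x (by rw [PySem.List.mem_pyRange_one]; omega)
    exact beq_iff_eq.mp (by simpa using this)
  · rintro ⟨h1, h2⟩
    refine ⟨h1, fun x hx => ?_⟩
    rw [PySem.List.mem_pyRange_one] at hx
    simpa using beq_iff_eq.mpr (h2 x hx.1 hx.2)

-- the empty field matches exactly the empty range
lemma pvP_nil_iff (a : List Char) (astart ee : Int) :
    pvP a astart ee [] = true ↔ ee = 0 := by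
  rw [pvP_iff]
  constructor
  · rintro ⟨h1, _⟩; simpa using h1.symm
  · intro h; subst h; exact ⟨by simp, fun x hx0 hxe => by omega⟩

-- the inner comparison loop succeeds exactly when every position in [ei, ee) matches
lemma pvCmpLoop_spec (d a : List Char) (di astart ee : Int)
    (hd0 : 0 ≤ di) (hdl : di + ee ≤ (d.length : Int)) :
    ∀ (fuel : Nat) (ei : Int), 0 ≤ ei → ei ≤ ee → (ee - ei).toNat ≤ fuel →
    ((pvCmpLoop d a di astart ee ei fuel = ee) ↔
      ∀ x : Int, ei ≤ x → x < ee →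
        PySem.List.pyGet? a (astart + x) = PySem.List.pyGet? d (di + x)) := by
  intro fuel
  induction fuel with
  | zero =>
    intro ei h0 h1 h2
    have : ei = ee := by omega
    subst this
    simp only [pvCmpLoop]
    constructor
    · intro _ x hx1 hx2; omega
    · intro _; trivial
  | succ n ih =>
    intro ei h0 h1 h2
    by_cases heq : ei = ee
    · subst heq
      simp only [pvCmpLoop, lt_irrefl, decide_false, Bool.false_and, Bool.false_eq_true,
        if_false]
      constructor
      · intro _ x hx1 hx2; omega
      · intro _; trivial
    · have hlt : ei < ee := lt_of_le_of_ne h1 heq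
      have hkd : (di + ei).toNat < d.length := by omega
      have hgd : PySem.List.pyGet? d (di + ei) = some d[(di + ei).toNat] :=
        PySem.List.pyGet?_eq_some_getElem d (by omega) (by omega)
      by_cases hch : PySem.List.pyGet? a (astart + ei) = some d[(di + ei).toNat]
      · have hguard : (decide (ei < ee) &&
            (PySem.List.pyGet? d (di + ei) == PySem.List.pyGet? a (astart + ei))) = true := by
          simp [hlt, hgd, hch]
        rw [pvCmpLoop, hguard, if_pos rfl]
        rw [ih (ei + 1) (by omega) (by omega) (by omega)]
        constructor
        · intro h x hx1 hx2
          by_cases hxe : x = ei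
          · subst hxe; rw [hch, hgd]
          · exact h x (by omega) hx2
        · intro h x hx1 hx2
          exact h x (by omega) hx2
      · have hguard : (decide (ei < ee) &&
            (PySem.List.pyGet? d (di + ei) == PySem.List.pyGet? a (astart + ei))) = false := by
          simp only [hgd, Bool.and_eq_false_iff]
          right
          simp only [beq_eq_false_iff_ne, ne_eq]
          intro h; exact hch h.symm
        rw [pvCmpLoop, hguard]
        simp only [Bool.false_eq_true, if_false]
        constructor
        · intro h; omega
        · intro h
          exact absurd ((h ei (le_refl _) hlt).trans hgd) hch

-- cmpStringListPart applied to the field dest[di:dn] is the per-field test of that field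
lemma pvCmp_iff (d a : List Char) (di dn astart aend : Int)
    (h0di : 0 ≤ di) (hdidn : di ≤ dn) (hdn : dn ≤ (d.length : Int)) :
    (pvCmp d di dn a astart aend
      = pvP a astart (aend - astart) ((d.drop di.toNat).take (dn - di).toNat)) := by
  set f := (d.drop di.toNat).take (dn - di).toNat with hf
  have hflen : f.length = (dn - di).toNat := by
    rw [hf, List.length_take, List.length_drop]; omega
  simp only [pvCmp]
  by_cases hlen : aend - astart = dn - di
  · rw [if_neg (by omega)]
    rw [Bool.eq_iff_iff, beq_iff_eq, pvP_iff,
      pvCmpLoop_spec d a di astart (aend - astart) h0di (by omega)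
        (aend - astart).toNat 0 (by omega) (by omega) (by omega)]
    have hget : ∀ x : Int, 0 ≤ x → x < aend - astart →
        PySem.List.pyGet? d (di + x) = PySem.List.pyGet? f x := by
      intro x hx0 hxe
      rw [PySem.List.pyGet?_of_nonneg _ (by omega), PySem.List.pyGet?_of_nonneg _ hx0]
      rw [hf, List.getElem?_take, List.getElem?_drop]
      have h1 : x.toNat < (dn - di).toNat := by omega
      have h2 : (di + x).toNat = di.toNat + x.toNat := by omega
      rw [if_pos h1, h2]
    constructor
    · intro h
      refine ⟨by rw [hflen]; omega, fun x hx0 hxe => ?_⟩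
      rw [← hget x hx0 hxe]
      exact h x hx0 hxe
    · rintro ⟨_, h⟩ x hx0 hxe
      rw [hget x hx0 hxe]
      exact h x hx0 hxe
  · rw [if_pos (by omega)]
    have : pvP a astart (aend - astart) f = false := by
      rw [← Bool.not_eq_true, pvP_iff]
      rintro ⟨h1, _⟩
      rw [hflen] at h1
      omega
    rw [this]

-- the comma scan stops at di + (length of the comma-free prefix from di)
lemma pvScan_spec (d : List Char) :
    ∀ (fuel : Nat) (di : Int), 0 ≤ di → ((d.length : Int) - di).toNat ≤ fuel →
    pvScanComma d (d.length : Int) di fuel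
      = di + (((d.drop di.toNat).takeWhile (· ≠ ',')).length : Int) := by
  intro fuel
  induction fuel with
  | zero =>
    intro di h0 h1
    have hge : (d.length : Int) ≤ di := by omega
    have : d.drop di.toNat = [] := List.drop_of_length_le (by omega)
    simp [pvScanComma, this]
  | succ n ih =>
    intro di h0 h1
    by_cases hlt : di < (d.length : Int)
    · have hidx : di.toNat < d.length := by omega
      have hgd : PySem.List.pyGet? d di = some d[di.toNat] :=
        PySem.List.pyGet?_eq_some_getElem d h0 (by omega)
      have hdrop : d.drop di.toNat = d[di.toNat] :: d.drop (di.toNat + 1) :=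
        List.drop_eq_getElem_cons hidx
      by_cases hc : d[di.toNat] = ','
      · have hguard : (decide (di < (d.length : Int)) &&
            (PySem.List.pyGet? d di != some ',')) = false := by
          simp [hgd, hc]
        rw [pvScanComma, hguard]
        simp only [Bool.false_eq_true, if_false]
        have htw : (d.drop di.toNat).takeWhile (· ≠ ',') = [] := by
          rw [hdrop, List.takeWhile_cons]
          simp [hc]
        rw [htw]
        simp
      · have hguard : (decide (di < (d.length : Int)) &&
            (PySem.List.pyGet? d di != some ',')) = true := by
          simp [hlt, hgd, hc]
        rw [pvScanComma, hguard, if_pos rfl]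
        rw [ih (di + 1) (by omega) (by omega)]
        have h2 : (di + 1).toNat = di.toNat + 1 := by omega
        have htw : (d.drop di.toNat).takeWhile (· ≠ ',')
            = d[di.toNat] :: ((d.drop (di.toNat + 1)).takeWhile (· ≠ ',')) := by
          rw [hdrop, List.takeWhile_cons]
          simp [hc]
        rw [h2, htw]
        simp only [List.length_cons]
        push_cast
        omega
    · have hguard : (decide (di < (d.length : Int)) &&
            (PySem.List.pyGet? d di != some ',')) = false := by
        simp [hlt]
      rw [pvScanComma, hguard]
      simp only [Bool.false_eq_true, if_false]
      have : d.drop di.toNat = [] := List.drop_of_length_le (by omega)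
      simp [this]

lemma pvOuter_succ (d a : List Char) (astart aend de di : Int) (n : Nat) :
    pvOuter d a astart aend de di (n + 1)
      = if di < de then
          (if pvCmp d di (pvScanComma d de di (de - di).toNat) a astart aend then true
           else pvOuter d a astart aend de ((pvScanComma d de di (de - di).toNat) + 1) n)
        else false := rfl

-- the outer loop is the any-scan of the per-field test over the fields from position di on
lemma pvOuter_spec (d a : List Char) (astart aend : Int) :
    ∀ (fuel : Nat) (di : Int), 0 ≤ di → ((d.length : Int) - di).toNat < fuel →
    pvOuter d a astart aend (d.length : Int) di fuel
      = (pvFieldsA (d.drop di.toNat)).any (pvP a astart (aend - astart)) := by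
  intro fuel
  induction fuel with
  | zero => intro di h0 h1; omega
  | succ n ih =>
    intro di h0 hfuel
    by_cases hlt : di < (d.length : Int)
    · set s := d.drop di.toNat with hs
      have hsne : s ≠ [] := by
        rw [hs, ← List.length_pos_iff, List.length_drop]; omega
      set tw := s.takeWhile (· ≠ ',') with htw
      have hscan : pvScanComma d (d.length : Int) di ((d.length : Int) - di).toNat
          = di + (tw.length : Int) :=
        pvScan_spec d _ di h0 (le_refl _)
      have htwlen : tw.length ≤ s.length := by
        rw [htw]; exact (List.takeWhile_prefix _).length_le
      have hslen : s.length = d.length - di.toNat := by rw [hs, List.length_drop]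
      set dn := di + (tw.length : Int) with hdn
      have hdnle : dn ≤ (d.length : Int) := by omega
      have htake : (d.drop di.toNat).take (dn - di).toNat = tw := by
        have h' : (dn - di).toNat = tw.length := by omega
        rw [h', ← hs]
        exact ((List.prefix_iff_eq_take).mp (List.takeWhile_prefix _)).symm
      have hcmp := pvCmp_iff d a di dn astart aend h0 (by omega) hdnle
      rw [htake] at hcmp
      have hfields : pvFieldsA s = tw :: pvFieldsA ((s.dropWhile (· ≠ ',')).tail) :=
        pvFieldsA_unfold s hsne
      have hnext : d.drop (dn + 1).toNat = (s.dropWhile (· ≠ ',')).tail := by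
        have e1 : (dn + 1).toNat = di.toNat + (tw.length + 1) := by omega
        have e2 : s.drop tw.length = s.dropWhile (· ≠ ',') := by
          conv_lhs => rw [← List.takeWhile_append_dropWhile (p := (· ≠ ',')) (l := s), ← htw]
          exact List.drop_left
        have e4 : d.drop (di.toNat + (tw.length + 1)) = s.drop (tw.length + 1) := by
          rw [hs, List.drop_drop]
        have e5 : ∀ (l : List Char) (k : Nat), l.drop (k + 1) = (l.drop k).tail := by
          intro l k
          rw [← List.drop_one, List.drop_drop]
        rw [e1, e4, e5 s tw.length, e2]
      rw [pvOuter_succ, if_pos hlt, hscan]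
      rw [hfields, List.any_cons]
      by_cases hc : pvCmp d di dn a astart aend = true
      · rw [if_pos hc]
        rw [hcmp] at hc
        rw [hc]
        simp
      · rw [if_neg hc]
        have hP : pvP a astart (aend - astart) tw = false := by
          rw [← hcmp]
          exact Bool.not_eq_true _ ▸ (Bool.eq_false_iff.mpr hc)
        rw [ih (dn + 1) (by omega) (by omega), hnext, hP, Bool.false_or]
    · rw [pvOuter, if_neg hlt]
      have : d.drop di.toNat = [] := by
        apply List.drop_of_length_le; omega
      rw [this, pvFieldsA_nil]
      simp

-- A's result, in closed form: the per-field test scanned over the fields A visits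
lemma pvA_eq (dest add : String) (astart aend : Int) :
    isInStringListPart dest add astart aend
      = (pvFieldsA dest.toList).any (pvP add.toList astart (aend - astart)) := by
  unfold isInStringListPart
  rw [pvOuter_spec dest.toList add.toList astart aend
    (dest.toList.length + 1) 0 (by omega) (by omega)]
  simp

-- ===== B-side lemmas =====

-- [x] is an infix iff x is a member
lemma pvSingleton_infix_iff (x : Char) (l : List Char) :
    [x] <:+: l ↔ x ∈ l := by
  induction l with
  | nil => simp [List.infix_nil]
  | cons c r ih =>
    rw [List.infix_cons_iff, pvSingleton_prefix_iff]
    simp [ih, eq_comm]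

-- every scanned field is comma-free
lemma pvFieldsA_commaFree : ∀ (n : Nat) (l : List Char), l.length ≤ n →
    ∀ f ∈ pvFieldsA l, ',' ∉ f := by
  intro n
  induction n with
  | zero =>
    intro l hl f hf
    have : l = [] := List.eq_nil_of_length_eq_zero (by omega)
    rw [this, pvFieldsA_nil] at hf
    simp at hf
  | succ m ih =>
    intro l hl f hf
    by_cases h : l = []
    · rw [h, pvFieldsA_nil] at hf; simp at hf
    · rw [pvFieldsA_unfold l h] at hf
      rcases List.mem_cons.mp hf with hf1 | hf1
      · subst hf1
        intro hmem
        have := List.mem_takeWhile_imp hmem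
        simp at this
      · refine ih ((l.dropWhile (· ≠ ',')).tail) ?_ f hf1
        cases l with
        | nil => exact absurd rfl h
        | cons c r =>
          have h1 := List.length_dropWhile_le (fun x => decide (x ≠ ',')) (c :: r)
          have h2 : ((c :: r).dropWhile (· ≠ ',')).tail.length
              = ((c :: r).dropWhile (· ≠ ',')).length - 1 := List.length_tail
          simp only [List.length_cons] at *
          omega

-- t followed by ',' is a prefix of r ++ [','] iff t is r's first comma-free field
lemma pvPrefixField (t : List Char) (ht : ',' ∉ t) :
    ∀ (r : List Char), (t ++ [','] <+: r ++ [',']) ↔ t = r.takeWhile (· ≠ ',') := by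
  induction t with
  | nil =>
    intro r
    cases r with
    | nil => simp
    | cons c rest =>
      simp only [List.nil_append, List.cons_append, List.takeWhile_cons]
      rw [pvSingleton_prefix_iff]
      by_cases hc : c = ','
      · simp [hc]
      · simp [hc, Ne.symm hc]
  | cons a t' ih =>
    intro r
    have ha : a ≠ ',' := fun h => ht (h ▸ List.mem_cons_self)
    have ht' : ',' ∉ t' := fun h => ht (List.mem_cons_of_mem _ h)
    cases r with
    | nil =>
      simp only [List.nil_append, List.cons_append, List.cons_prefix_cons]
      constructor
      · rintro ⟨h1, _⟩; exact absurd h1 ha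
      · intro h; simp [List.takeWhile] at h
    | cons c rest =>
      simp only [List.cons_append, List.cons_prefix_cons, List.takeWhile_cons]
      by_cases hc : c = ','
      · subst hc
        simp only [ne_eq, not_true_eq_false, decide_false, Bool.false_eq_true, if_false]
        constructor
        · rintro ⟨h1, _⟩; exact absurd h1 ha
        · intro h; simp at h
      · simp only [ne_eq, hc, not_false_eq_true, decide_true, if_pos]
        rw [ih ht' rest]
        constructor
        · rintro ⟨h1, h2⟩; rw [h1, h2]
        · intro h; injection h with e1 e2; exact ⟨e1, e2⟩

-- the first element of split(',') is the comma-free prefix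
lemma pvSplitC_head : ∀ (r : List Char), ∃ tl, pvSplitC r = (r.takeWhile (· ≠ ',')) :: tl := by
  intro r
  induction r with
  | nil => exact ⟨[], by simp [pvSplitC_nil]⟩
  | cons c rest ih =>
    by_cases hc : c = ','
    · subst hc
      exact ⟨pvSplitC rest, by rw [pvSplitC_comma]; simp [List.takeWhile_cons]⟩
    · obtain ⟨tl, htl⟩ := ih
      exact ⟨tl, by rw [pvSplitC_cons_ne c hc rest _ tl htl]; simp [List.takeWhile_cons, hc]⟩

-- the delimiter-wrapped substring test, characterised against split(',') membership:
-- G: wrapped t is an infix of ','++d++',' iff t is one of d's comma-separated fields;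
-- H: wrapped t is an infix of d++',' iff t is a NON-FIRST field (it needs a comma before it)
lemma pvWrapIff : ∀ (n : Nat) (d t : List Char), d.length ≤ n → ',' ∉ t →
    ((([','] ++ t ++ [',']) <:+: ([','] ++ d ++ [','])) ↔ t ∈ pvSplitC d) ∧
    ((([','] ++ t ++ [',']) <:+: (d ++ [','])) ↔ t ∈ (pvSplitC d).tail) := by
  intro n
  induction n with
  | zero =>
    intro d t hd ht
    have hdn : d = [] := List.eq_nil_of_length_eq_zero (by omega)
    subst hdn
    constructor
    · rw [pvSplitC_nil]
      constructor
      · intro h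
        have hlen := h.length_le
        simp only [List.length_append, List.length_cons, List.length_nil] at hlen
        have htn : t = [] := List.eq_nil_of_length_eq_zero (by omega)
        simp [htn]
      · intro h
        simp only [List.mem_singleton] at h
        subst h
        exact List.infix_refl _
    · rw [pvSplitC_nil]
      constructor
      · intro h
        have hlen := h.length_le
        simp only [List.length_append, List.length_cons, List.length_nil] at hlen
        omega
      · intro h; simp at h
  | succ m ih =>
    intro d t hd ht
    cases d with
    | nil => exact ih [] t (by simp) ht
    | cons c r =>
      have hr : r.length ≤ m := by simp at hd; omega
      have hw : ([','] ++ t ++ [','] : List Char) = ',' :: (t ++ [',']) := by simp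
      by_cases hc : c = ','
      · subst hc
        have hH : (([','] ++ t ++ [',']) <:+: ((',' :: r) ++ [',']))
            ↔ t ∈ (pvSplitC (',' :: r)).tail := by
          rw [pvSplitC_comma, List.tail_cons]
          have e : (',' :: r) ++ [','] = [','] ++ r ++ [','] := by simp
          rw [e]
          exact (ih r t hr ht).1
        refine ⟨?_, hH⟩
        rw [pvSplitC_comma]
        have hbig : [','] ++ (',' :: r) ++ [','] = ',' :: ((',' :: r) ++ [',']) := by simp
        rw [hbig, List.infix_cons_iff]
        constructor
        · rintro (h | h)
          · rw [hw] at h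
            have h2 : t ++ [','] <+: (',' :: r) ++ [','] := (List.cons_prefix_cons.mp h).2
            rw [pvPrefixField t ht (',' :: r)] at h2
            have h3 : (',' :: r).takeWhile (· ≠ ',') = [] := by
              rw [List.takeWhile_cons]; simp
            rw [h3] at h2
            simp [h2]
          · have h2 := hH.mp h
            rw [pvSplitC_comma, List.tail_cons] at h2
            exact List.mem_cons_of_mem _ h2
        · intro h
          rcases List.mem_cons.mp h with h0 | h0
          · left
            rw [hw, h0]
            refine List.cons_prefix_cons.mpr ⟨rfl, ?_⟩
            simp [pvSingleton_prefix_iff]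
          · right
            exact hH.mpr (by rw [pvSplitC_comma, List.tail_cons]; exact h0)
      · obtain ⟨tl, hsp⟩ := pvSplitC_head r
        set h1 := r.takeWhile (· ≠ ',') with hh1
        have hspd : pvSplitC (c :: r) = (c :: h1) :: tl := pvSplitC_cons_ne c hc r h1 tl hsp
        have htake : (c :: r).takeWhile (· ≠ ',') = c :: h1 := by
          rw [List.takeWhile_cons]; simp [hc, hh1]
        have hH : (([','] ++ t ++ [',']) <:+: ((c :: r) ++ [',']))
            ↔ t ∈ (pvSplitC (c :: r)).tail := by
          rw [hspd, List.tail_cons]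
          have e : (c :: r) ++ [','] = c :: (r ++ [',']) := by simp
          rw [e, List.infix_cons_iff]
          constructor
          · rintro (h | h)
            · exfalso
              rw [hw] at h
              exact hc (List.cons_prefix_cons.mp h).1.symm
            · have h2 := (ih r t hr ht).2.mp h
              rw [hsp, List.tail_cons] at h2
              exact h2
          · intro h
            right
            exact (ih r t hr ht).2.mpr (by rw [hsp, List.tail_cons]; exact h)
        refine ⟨?_, hH⟩
        rw [hspd]
        have hbig : [','] ++ (c :: r) ++ [','] = ',' :: ((c :: r) ++ [',']) := by simp
        rw [hbig, List.infix_cons_iff]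
        constructor
        · rintro (h | h)
          · rw [hw] at h
            have h2 : t ++ [','] <+: (c :: r) ++ [','] := (List.cons_prefix_cons.mp h).2
            rw [pvPrefixField t ht (c :: r), htake] at h2
            simp [h2]
          · have h2 := hH.mp h
            rw [hspd, List.tail_cons] at h2
            exact List.mem_cons_of_mem _ h2
        · intro h
          rcases List.mem_cons.mp h with h0 | h0
          · left
            subst h0
            rw [hw]
            refine List.cons_prefix_cons.mpr ⟨rfl, ?_⟩
            rw [pvPrefixField (c :: h1) ht (c :: r), htake]
          · right
            exact hH.mpr (by rw [hspd, List.tail_cons]; exact h0)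

-- an empty slice: xs[k:k] = []
lemma pvSlice_self (l : List Char) (k : Int) : PySem.List.slice l (some k) (some k) = [] := by
  have h : (PySem.List.slice l (some k) (some k)).length = 0 := by
    rw [PySem.List.length_slice]
    omega
  exact List.eq_nil_of_length_eq_zero h

-- the per-field test holds exactly for the extracted slice (in-range target)
lemma pvP_eq_iff (a : List Char) (astart aend : Int)
    (h0 : 0 ≤ astart) (h1 : astart ≤ aend) (h2 : aend ≤ (a.length : Int)) (f : List Char) :
    pvP a astart (aend - astart) f = true
      ↔ f = (a.drop astart.toNat).take (aend.toNat - astart.toNat) := by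
  set t := (a.drop astart.toNat).take (aend.toNat - astart.toNat) with hts
  have htlen : t.length = aend.toNat - astart.toNat := by
    rw [hts, List.length_take, List.length_drop]; omega
  have hget : ∀ x : Int, 0 ≤ x → x < aend - astart →
      PySem.List.pyGet? a (astart + x) = PySem.List.pyGet? t x := by
    intro x hx0 hxe
    rw [PySem.List.pyGet?_of_nonneg _ (by omega), PySem.List.pyGet?_of_nonneg _ hx0]
    rw [hts, List.getElem?_take, List.getElem?_drop]
    have hx1 : x.toNat < aend.toNat - astart.toNat := by omega
    have hx2 : (astart + x).toNat = astart.toNat + x.toNat := by omega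
    rw [if_pos hx1, hx2]
  rw [pvP_iff]
  constructor
  · rintro ⟨hlen, hall⟩
    have hflen : f.length = t.length := by rw [htlen]; omega
    refine List.ext_getElem? fun i => ?_
    by_cases hi : i < f.length
    · have hx0 : (0:Int) ≤ (i : Int) := by omega
      have hxe : (i : Int) < aend - astart := by omega
      have := (hall (i : Int) hx0 hxe).symm.trans (hget (i : Int) hx0 hxe)
      rw [PySem.List.pyGet?_of_nonneg _ hx0, PySem.List.pyGet?_of_nonneg _ hx0] at this
      simpa using this
    · rw [List.getElem?_eq_none (by omega), List.getElem?_eq_none (by omega)]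
  · intro h
    subst h
    refine ⟨by rw [htlen]; omega, fun x hx0 hxe => hget x hx0 hxe⟩

-- a negative range matches nothing
lemma pvP_neg (a : List Char) (astart ee : Int) (hee : ee < 0) (f : List Char) :
    pvP a astart ee f = false := by
  rw [← Bool.not_eq_true, pvP_iff]
  rintro ⟨h1, _⟩
  omega

-- ===== VERDICT (by name: the statement is the Claim_ definition above) =====
theorem isInStringListPart_spec : Claim_unchanged_isInStringListPart := by
  intro dest add astart aend hdom hpre hnd
  rw [pvA_eq dest add astart aend]
  by_cases hde : dest = ""
  · have hnil : dest.toList = [] := String.toList_eq_nil_iff.mpr hde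
    rw [hnil, pvFieldsA_nil]
    simp [isInStringListPart_alt, hde]
  · have hdl : dest.toList ≠ [] := fun h => hde (String.toList_eq_nil_iff.mp h)
    by_cases hlt : aend < astart
    · have hB : isInStringListPart_alt dest add astart aend = false := by
        simp [isInStringListPart_alt, hlt]
      rw [hB, List.any_eq_false]
      intro f _
      simp [pvP_neg add.toList astart (aend - astart) (by omega) f]
    · have hax : astart ≤ aend := by omega
      have hwrap := fun t ht =>
        pvWrapIff dest.toList.length dest.toList t (le_refl _) ht
      by_cases heqa : astart = aend
      · -- empty target
        have hsl : PySem.List.slice add.toList (some astart) (some aend) = [] := by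
          rw [← heqa]; exact pvSlice_self add.toList astart
        have hB : isInStringListPart_alt dest add astart aend
            = PySem.Chars.isIn ([','] ++ ([] : List Char) ++ [','])
                ([','] ++ dest.toList ++ [',']) := by
          unfold isInStringListPart_alt
          rw [if_neg (by simp [hde, hlt]), hsl,
            if_neg (by simp [PySem.Chars.isIn_iff_infix, List.infix_nil])]
        rw [hB, Bool.eq_iff_iff, List.any_eq_true]
        have hIn : PySem.Chars.isIn ([','] ++ ([] : List Char) ++ [','])
            ([','] ++ dest.toList ++ [',']) = true ↔ ([] : List Char) ∈ pvSplitC dest.toList := by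
          rw [PySem.Chars.isIn_iff_infix]
          exact (hwrap [] (by simp)).1
        have hee : aend - astart = 0 := by omega
        have hPf : ∀ f, pvP add.toList astart (aend - astart) f = true ↔ f = [] := by
          intro f
          constructor
          · intro h
            have hlf := ((pvP_iff _ _ _ f).mp h).1
            exact List.eq_nil_of_length_eq_zero (by omega)
          · intro h; subst h
            exact (pvP_nil_iff add.toList astart (aend - astart)).mpr hee
        rw [hIn, pvSplitC_fieldsA]
        by_cases hlast : dest.toList.getLast? = some ','
        · rw [if_pos (Or.inl hlast)]
          constructor
          · intro _; simp
          · intro _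
            refine ⟨[], ?_, (hPf []).mpr rfl⟩
            rw [(pvMem_nil_fieldsA dest.toList).1]
            unfold D_isInStringListPart at hnd
            push_neg at hnd
            have hrem := hnd heqa hdl hlast
            by_cases hh : dest.toList.head? = some ','
            · exact Or.inl hh
            · have hb : PySem.Chars.isIn [',', ','] dest.toList = true := by
                cases hb0 : PySem.Chars.isIn [',', ','] dest.toList with
                | false => exact absurd hb0 (hrem hh)
                | true => rfl
              exact Or.inr ((PySem.Chars.isIn_iff_infix _ _).mp hb)
        · rw [if_neg (by simp [hlast, hdl])]
          constructor
          · rintro ⟨f, hf, hP⟩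
            rw [(hPf f).mp hP] at hf
            exact hf
          · intro h
            exact ⟨[], h, (hPf []).mpr rfl⟩
      · -- nonempty target, in range
        have hlt2 : astart < aend := by omega
        have hrange : 0 ≤ astart ∧ aend ≤ (add.toList.length : Int) := by
          rcases hpre with h | h
          · omega
          · exact h
        set t := (add.toList.drop astart.toNat).take (aend.toNat - astart.toNat) with hts
        have hsl : PySem.List.slice add.toList (some astart) (some aend) = t :=
          PySem.List.slice_of_nonneg add.toList hrange.1 (by omega) (by omega) hrange.2
        have htlen : t.length = aend.toNat - astart.toNat := by
          rw [hts, List.length_take, List.length_drop]; omega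
        have htne : t ≠ [] := by
          intro h
          rw [h, List.length_nil] at htlen
          omega
        by_cases hct : ',' ∈ t
        · have hB : isInStringListPart_alt dest add astart aend = false := by
            unfold isInStringListPart_alt
            rw [if_neg (by simp [hde, hlt]), hsl,
              if_pos ((PySem.Chars.isIn_iff_infix [','] t).mpr
                ((pvSingleton_infix_iff ',' t).mpr hct))]
          rw [hB, List.any_eq_false]
          intro f hf
          intro hP
          have hfe : f = t := (pvP_eq_iff add.toList astart aend hrange.1 hax hrange.2 f).mp hP
          exact pvFieldsA_commaFree dest.toList.length dest.toList (le_refl _) f hf (hfe ▸ hct)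
        · have hB : isInStringListPart_alt dest add astart aend
              = PySem.Chars.isIn ([','] ++ t ++ [',']) ([','] ++ dest.toList ++ [',']) := by
            unfold isInStringListPart_alt
            rw [if_neg (by simp [hde, hlt]), hsl,
              if_neg (by
                rw [Bool.not_eq_true, PySem.Chars.isIn_eq_false_iff, pvSingleton_infix_iff]
                exact hct)]
          rw [hB, Bool.eq_iff_iff, List.any_eq_true]
          rw [PySem.Chars.isIn_iff_infix, (hwrap t hct).1]
          have hPf : ∀ f, pvP add.toList astart (aend - astart) f = true ↔ f = t :=
            pvP_eq_iff add.toList astart aend hrange.1 hax hrange.2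
          rw [pvSplitC_fieldsA]
          have hmem : ∀ (L : List (List Char)), (∃ f ∈ L, pvP add.toList astart (aend - astart) f = true) ↔ t ∈ L := by
            intro L
            constructor
            · rintro ⟨f, hf, hP⟩; rw [(hPf f).mp hP] at hf; exact hf
            · intro h; exact ⟨t, h, (hPf t).mpr rfl⟩
          by_cases hlast : dest.toList.getLast? = some ','
          · rw [if_pos (Or.inl hlast)]
            rw [hmem, List.mem_append]
            constructor
            · intro h; exact Or.inl h
            · rintro (h | h)
              · exact h
              · exact absurd (by simpa using h) htne
          · rw [if_neg (by simp [hlast, hdl]), hmem]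

theorem isInStringListPart_changed : Claim_changed_isInStringListPart := by
  unfold Claim_changed_isInStringListPart; decide

theorem isInStringListPart_tight : Claim_exact_isInStringListPart := by
  intro dest add astart aend hdom hpre hd
  obtain ⟨hstart, hdne, hlast, hhead, hinfB⟩ := hd
  have hinf : ¬ [',', ','] <:+: dest.toList := (PySem.Chars.isIn_eq_false_iff _ _).mp hinfB
  have hempty : dest ≠ "" := fun h => hdne (by rw [h]; rfl)
  have hee : aend - astart = 0 := by omega
  have hA : isInStringListPart dest add astart aend = false := by
    rw [pvA_eq dest add astart aend]
    rw [← Bool.not_eq_true, List.any_eq_true]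
    rintro ⟨f, hf, hPf⟩
    have hfnil : f = [] := by
      have hlf := ((pvP_iff add.toList astart (aend - astart) f).mp hPf).1
      exact List.eq_nil_of_length_eq_zero (by omega)
    subst hfnil
    rw [(pvMem_nil_fieldsA dest.toList).1] at hf
    rcases hf with h | h
    · exact hhead h
    · exact hinf h
  have hB : isInStringListPart_alt dest add astart aend = true := by
    unfold isInStringListPart_alt
    have hsl : PySem.List.slice add.toList (some astart) (some aend) = [] := by
      rw [← hstart]; exact pvSlice_self add.toList astart
    rw [if_neg (by simp [hempty]; omega), hsl,
      if_neg (by simp [PySem.Chars.isIn_iff_infix, List.infix_nil])]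
    rw [PySem.Chars.isIn_iff_infix]
    rw [(pvWrapIff dest.toList.length dest.toList [] (le_refl _) (by simp)).1]
    rw [pvSplitC_fieldsA, if_pos (Or.inl hlast)]
    simp
  rw [hA, hB]
  simp
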